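-- pv_equiv track=rewrite | github.com/Dowhyj32/TDA-Algo-3 | 2ºC 2025/Talleres/T2_DP/alfabeticamente.py | alfabeticamente
-- ===== SOURCE A (Python) =====
-- import math
--
-- def alfabeticamente(cantd_palabras, Costos, palabras):
--
--     invertidas = [p[::-1] for p in palabras]
--
--     #Costo min hasta i si dejo la palabra normal
--     dp_sin_invertir = [float('inf')]*cantd_palabras
--
--     #Costo min hasta i si dejo la palabra invertida
--     dp_invirtiendo = [float('inf')]*cantd_palabras
--
--     #Caso base
--     dp_sin_invertir[0] = 0
--     dp_invirtiendo[0] = Costos[0]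
--
--     for i in range(1,cantd_palabras):
--
--         #Si quiero dejar la palabra normal
--         #Puedo venir de una palabra normal
--         if palabras[i-1]<=palabras[i]:
--             dp_sin_invertir[i] = min(dp_sin_invertir[i],dp_sin_invertir[i-1])
--
--         #Puedo venir de una palabra invertida
--         if invertidas[i-1]<=palabras[i]:
--             dp_sin_invertir[i] = min(dp_sin_invertir[i], dp_invirtiendo[i-1])
--
--         #Quiero invertir la palabra
--         #Puedo venir de una palabra normal
--         if palabras[i-1]<=invertidas[i]:
--             dp_invirtiendo[i] = min(dp_invirtiendo[i], dp_sin_invertir[i-1]+Costos[i])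
--
--         #Puedo venir de una palabra invertida
--         if invertidas[i-1]<=invertidas[i]:
--             dp_invirtiendo[i] = min(dp_invirtiendo[i], dp_invirtiendo[i-1]+Costos[i])
--
--     res = min(dp_sin_invertir[-1], dp_invirtiendo[-1])
--
--     return -1 if math.isinf(res) else res
-- ===== SOURCE B (Python) =====
-- import math
--
-- def alfabeticamente(cantd_palabras, Costos, palabras):
--     # Balanced divide-and-conquer over (min,+) 2x2 "transfer matrices":
--     # seg(i, j)[a][b] = min reversal cost making words[i..j] sorted with
--     # word i in orientation a and word j in orientation b (0 = as given, 1 = reversed).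
--     INF = math.inf
--     invertidas = [p[::-1] for p in palabras]
--
--     def form(k, o):
--         return invertidas[k] if o else palabras[k]
--
--     def combine(L, R, k):
--         # adjacent segments meeting between words k and k+1
--         return [[min((L[a][c] + R[d][b]
--                       for c in (0, 1) for d in (0, 1)
--                       if form(k, c) <= form(k + 1, d)), default=INF)
--                  for b in (0, 1)] for a in (0, 1)]
--
--     def seg(i, j):
--         if i == j:
--             return [[0, INF], [INF, Costos[i]]]
--         m = (i + j) // 2
--         return combine(seg(i, m), seg(m + 1, j), m)
--
--     M = seg(0, cantd_palabras - 1)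
--     res = min(M[0][0], M[0][1], M[1][0], M[1][1])
--     return -1 if math.isinf(res) else res
-- ===== Notes on version B (the rewrite author's own statement) =====
-- stated objective: alternative
-- what changed: Replaced A's left-to-right two-array DP by a balanced divide-and-conquer reduction: each word becomes a 2x2 (min,+) transfer matrix (entries = min cost with fixed first/last orientation) and adjacent segments are merged with a lexicographic-feasibility gate, the answer being the min entry of the root matrix.
-- outside the precondition, e.g. on alfabeticamente(2, [5], ['b', 'a']): A returns -1, B raises IndexError; on alfabeticamente(1, [7], []): A returns 0, B returns 0
import Mathlib
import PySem

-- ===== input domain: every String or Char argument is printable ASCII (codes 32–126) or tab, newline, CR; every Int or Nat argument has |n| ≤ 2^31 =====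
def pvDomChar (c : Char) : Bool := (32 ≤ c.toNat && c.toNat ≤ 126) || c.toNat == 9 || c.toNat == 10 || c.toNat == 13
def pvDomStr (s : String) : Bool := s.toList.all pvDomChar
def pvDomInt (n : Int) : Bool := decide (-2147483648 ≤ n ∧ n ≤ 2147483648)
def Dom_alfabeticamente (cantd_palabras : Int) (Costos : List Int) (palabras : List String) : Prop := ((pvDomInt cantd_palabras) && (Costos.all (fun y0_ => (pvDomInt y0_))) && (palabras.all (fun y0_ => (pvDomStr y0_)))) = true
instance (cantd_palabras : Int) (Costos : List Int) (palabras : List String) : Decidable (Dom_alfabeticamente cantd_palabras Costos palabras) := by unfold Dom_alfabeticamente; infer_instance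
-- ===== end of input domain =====

-- B replaces A's left-to-right two-array DP by a balanced divide-and-conquer reduction over
-- (min,+) 2x2 transfer matrices (one per word, merged with a lexicographic-feasibility gate):
-- a genuinely different decomposition of the same optimisation, same asymptotic cost.


-- shared tiny helpers: Python float('inf') is modelled as `none`
-- pvRev s = s[::-1]  (PySem.Str.slice?_none_none_neg_one: this is string reversal)
def pvRev (s : String) : String := (PySem.Str.slice? s none none (-1)).getD ""

-- Python min over int-or-inf values (inf = none)
def pvMinO : Option Int → Option Int → Option Int
  | none, b => b
  | some x, none => some x
  | some x, some y => some (min x y)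

-- Python (int-or-inf) + int
def pvAddO (a : Option Int) (c : Int) : Option Int := a.map (· + c)

-- ===== PORT A =====
-- one iteration of A's `for i in range(1, cantd_palabras)` body, state = (dp_sin_invertir, dp_invirtiendo)
def pvStepA (Costos : List Int) (palabras invertidas : List String)
    (st : List (Option Int) × List (Option Int)) (i : Int) :
    List (Option Int) × List (Option Int) :=
  let dpS := st.1
  let dpI := st.2
  let dpS := if PySem.List.pyGetD palabras (i-1) "" ≤ PySem.List.pyGetD palabras i "" then
      PySem.List.pySetD dpS i (pvMinO (PySem.List.pyGetD dpS i none) (PySem.List.pyGetD dpS (i-1) none)) else dpS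
  let dpS := if PySem.List.pyGetD invertidas (i-1) "" ≤ PySem.List.pyGetD palabras i "" then
      PySem.List.pySetD dpS i (pvMinO (PySem.List.pyGetD dpS i none) (PySem.List.pyGetD dpI (i-1) none)) else dpS
  let dpI := if PySem.List.pyGetD palabras (i-1) "" ≤ PySem.List.pyGetD invertidas i "" then
      PySem.List.pySetD dpI i (pvMinO (PySem.List.pyGetD dpI i none) (pvAddO (PySem.List.pyGetD dpS (i-1) none) (PySem.List.pyGetD Costos i 0))) else dpI
  let dpI := if PySem.List.pyGetD invertidas (i-1) "" ≤ PySem.List.pyGetD invertidas i "" then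
      PySem.List.pySetD dpI i (pvMinO (PySem.List.pyGetD dpI i none) (pvAddO (PySem.List.pyGetD dpI (i-1) none) (PySem.List.pyGetD Costos i 0))) else dpI
  (dpS, dpI)

def alfabeticamente (cantd_palabras : Int) (Costos : List Int) (palabras : List String) : Int :=
  let invertidas := palabras.map (fun p => pvRev p)
  let dp_sin_invertir : List (Option Int) := List.replicate cantd_palabras.toNat none
  let dp_invirtiendo : List (Option Int) := List.replicate cantd_palabras.toNat none
  let dp_sin_invertir := PySem.List.pySetD dp_sin_invertir 0 (some 0)
  let dp_invirtiendo := PySem.List.pySetD dp_invirtiendo 0 (some (PySem.List.pyGetD Costos 0 0))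
  let st := (PySem.List.pyRange 1 cantd_palabras 1).foldl (pvStepA Costos palabras invertidas)
              (dp_sin_invertir, dp_invirtiendo)
  match pvMinO (PySem.List.pyGetD st.1 (-1) none) (PySem.List.pyGetD st.2 (-1) none) with
  | none => -1
  | some v => v

-- ===== PORT B =====
-- Python int-or-inf addition of two such values (inf absorbing)
def pvAddOO : Option Int → Option Int → Option Int
  | some x, some y => some (x + y)
  | _, _ => none

-- Source B's 2x2 matrix [[m00, m01], [m10, m11]]; index false = 0 (word as given), true = 1 (reversed)
structure pvMat where
  m00 : Option Int
  m01 : Option Int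
  m10 : Option Int
  m11 : Option Int
  deriving DecidableEq, Repr

def pvEnt (M : pvMat) (a b : Bool) : Option Int :=
  match a, b with
  | false, false => M.m00
  | false, true => M.m01
  | true, false => M.m10
  | true, true => M.m11

-- Source B's `form(k, o)` (indices hit the lists under Pre_, so getD's default is unreachable there)
def pvForm (palabras invertidas : List String) (k : Nat) (o : Bool) : String :=
  if o then invertidas.getD k "" else palabras.getD k ""

-- Source B's `combine(L, R, k)`: entry (a,b) = min over (c,d) in Python's generator order, gated by
-- form(k,c) <= form(k+1,d); Python's min(..., default=inf) = this pvMinO chain with none for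
-- filtered-out terms (same value)
def pvCombine (palabras invertidas : List String) (L R : pvMat) (k : Nat) : pvMat :=
  let g : Bool → Bool → Prop := fun c d => pvForm palabras invertidas k c ≤ pvForm palabras invertidas (k+1) d
  let t : Bool → Bool → Option Int := fun a b =>
    pvMinO (pvMinO (pvMinO
      (if g false false then pvAddOO (pvEnt L a false) (pvEnt R false b) else none)
      (if g false true then pvAddOO (pvEnt L a false) (pvEnt R true b) else none))
      (if g true false then pvAddOO (pvEnt L a true) (pvEnt R false b) else none))
      (if g true true then pvAddOO (pvEnt L a true) (pvEnt R true b) else none)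
  ⟨t false false, t false true, t true false, t true true⟩

-- Source B's `seg(i, j)` base case [[0, INF], [INF, Costos[i]]] (Costos[i] in range under Pre_)
def pvSingle (Costos : List Int) (i : Nat) : pvMat :=
  ⟨some 0, none, none, some (Costos.getD i 0)⟩

-- Source B's `seg(i, j)`; Python tests `i == j` and recurses otherwise — under Pre_ every call has
-- i ≤ j, so the dichotomy `i < j` / `¬ i < j` is the same test (i > j never occurs)
def pvSeg (Costos : List Int) (palabras invertidas : List String) (i j : Nat) : pvMat :=
  if h : i < j then
    let m := (i + j) / 2
    pvCombine palabras invertidas (pvSeg Costos palabras invertidas i m)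
      (pvSeg Costos palabras invertidas (m+1) j) m
  else pvSingle Costos i
termination_by j - i
decreasing_by all_goals omega

def alfabeticamente_alt (cantd_palabras : Int) (Costos : List Int) (palabras : List String) : Int :=
  let invertidas := palabras.map (fun p => pvRev p)
  let M := pvSeg Costos palabras invertidas 0 (cantd_palabras - 1).toNat
  match pvMinO (pvMinO (pvMinO M.m00 M.m01) M.m10) M.m11 with
  | none => -1
  | some v => v

-- ===== PRECONDITION & SPEC =====
-- Pre_ excludes the inputs where A raises (cantd_palabras < 1, or an index up to cantd_palabras-1
-- out of range of Costos/palabras); among those length-mismatch inputs A happens to RETURN on the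
-- ones where it never touches the missing entry (no feasible reversal, or cantd_palabras = 1 with
-- palabras shorter): B's eager per-word Costos[i] lookup raises on the former and agrees on the latter.
def Pre_alfabeticamente (cantd_palabras : Int) (Costos : List Int) (palabras : List String) : Prop :=
  1 ≤ cantd_palabras ∧ cantd_palabras ≤ (Costos.length : Int) ∧ cantd_palabras ≤ (palabras.length : Int)
instance (cantd_palabras : Int) (Costos : List Int) (palabras : List String) : Decidable (Pre_alfabeticamente cantd_palabras Costos palabras) := by unfold Pre_alfabeticamente; infer_instance

def pvWitness_alfabeticamente : Int × List Int × List String := (2, [1, 2], ["ba", "ab"])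

def Spec_alfabeticamente (cantd_palabras : Int) (Costos : List Int) (palabras : List String) (out : Int) : Prop := out = alfabeticamente_alt cantd_palabras Costos palabras
instance (cantd_palabras : Int) (Costos : List Int) (palabras : List String) (out : Int) : Decidable (Spec_alfabeticamente cantd_palabras Costos palabras out) := by unfold Spec_alfabeticamente; infer_instance

-- ===== CLAIM (what is proved, stated in full; the proofs are below) =====
def Claim_equal_alfabeticamente : Prop := ∀ (cantd_palabras : Int) (Costos : List Int) (palabras : List String), Dom_alfabeticamente cantd_palabras Costos palabras → Pre_alfabeticamente cantd_palabras Costos palabras → Spec_alfabeticamente cantd_palabras Costos palabras (alfabeticamente cantd_palabras Costos palabras)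

-- ===== LEMMAS AND PROOFS =====

-- the step both sides realize (proof-side only)
def pvStepB (st : Option Int × Option Int) (pc : (String × String) × Int) : Option Int × Option Int :=
  let prev := pc.1.1
  let cur := pc.1.2
  let c := pc.2
  let prev_r := pvRev prev
  let cur_r := pvRev cur
  let n2 := pvMinO (if prev ≤ cur then st.1 else none) (if prev_r ≤ cur then st.2 else none)
  let r2 := pvAddO (pvMinO (if prev ≤ cur_r then st.1 else none) (if prev_r ≤ cur_r then st.2 else none)) c
  (n2, r2)

-- the common recursion both ports compute: (min cost ending normal, min cost ending reversed)
def pvSpecF (Costos : List Int) (palabras : List String) : Nat → Option Int × Option Int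
  | 0 => (some 0, some (PySem.List.pyGetD Costos 0 0))
  | m+1 => pvStepB (pvSpecF Costos palabras m)
      ((palabras.getD m "", palabras.getD (m+1) ""), Costos.getD (m+1) 0)

theorem pvMinO_none_right (a : Option Int) : pvMinO a none = a := by cases a <;> rfl

theorem pvAddO_minO (a b : Option Int) (c : Int) :
    pvAddO (pvMinO a b) c = pvMinO (pvAddO a c) (pvAddO b c) := by
  cases a <;> cases b <;> simp [pvAddO, pvMinO, min_add_add_right]

-- the state of A's arrays after the first m loop iterations (proof-side recursion)
def pvST (Costos : List Int) (palabras : List String) (N : Nat) : Nat → List (Option Int) × List (Option Int)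
  | 0 => (PySem.List.pySetD (List.replicate N (none : Option Int)) 0 (some 0),
          PySem.List.pySetD (List.replicate N (none : Option Int)) 0 (some (PySem.List.pyGetD Costos 0 0)))
  | m+1 => pvStepA Costos palabras (palabras.map (fun p => pvRev p))
            (pvST Costos palabras N m) (1 + (m : Int))

-- A's foldl over the index range computes pvST
theorem pvA_fold (Costos : List Int) (palabras : List String) (N m : Nat) :
    (List.map (fun (k : Nat) => (1 : Int) + (k : Int)) (List.range m)).foldl
        (pvStepA Costos palabras (palabras.map (fun p => pvRev p)))
        (PySem.List.pySetD (List.replicate N (none : Option Int)) 0 (some 0),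
         PySem.List.pySetD (List.replicate N (none : Option Int)) 0 (some (PySem.List.pyGetD Costos 0 0)))
      = pvST Costos palabras N m := by
  induction m with
  | zero => rfl
  | succ m ih => rw [List.range_succ, List.map_append, List.foldl_append, ih]; rfl

theorem pvGetD_set_self (l : List (Option Int)) (k : Nat) (v : Option Int) (h : k < l.length) :
    (l.set k v)[k]?.getD none = v := by
  simp [h]

theorem pvGetD_set_ne (l : List (Option Int)) (k j : Nat) (v : Option Int) (h : k ≠ j) :
    (l.set k v)[j]?.getD none = l[j]?.getD none := by
  simp [List.getElem?_set_ne h]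

theorem pvMinO_none_left (b : Option Int) : pvMinO none b = b := rfl

theorem pvAddO_none (c : Int) : pvAddO none c = none := rfl

-- what one iteration of A's loop body does to the two arrays, at the getD level
theorem pvStepA_eq (Costos : List Int) (palabras : List String) (m : Nat)
    (S I : List (Option Int))
    (hm1P : m + 1 < palabras.length)
    (hSlen : m + 1 < S.length) (hIlen : m + 1 < I.length)
    (hStop : S.getD (m+1) none = none) (hItop : I.getD (m+1) none = none) :
    ((pvStepA Costos palabras (palabras.map (fun p => pvRev p)) (S, I) (1 + (m:Int))).1.length = S.length) ∧
    ((pvStepA Costos palabras (palabras.map (fun p => pvRev p)) (S, I) (1 + (m:Int))).2.length = I.length) ∧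
    (∀ j : Nat, j ≠ m+1 →
      (pvStepA Costos palabras (palabras.map (fun p => pvRev p)) (S, I) (1 + (m:Int))).1.getD j none = S.getD j none ∧
      (pvStepA Costos palabras (palabras.map (fun p => pvRev p)) (S, I) (1 + (m:Int))).2.getD j none = I.getD j none) ∧
    ((pvStepA Costos palabras (palabras.map (fun p => pvRev p)) (S, I) (1 + (m:Int))).1.getD (m+1) none =
      pvMinO (if palabras.getD m "" ≤ palabras.getD (m+1) "" then S.getD m none else none)
             (if pvRev (palabras.getD m "") ≤ palabras.getD (m+1) "" then I.getD m none else none)) ∧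
    ((pvStepA Costos palabras (palabras.map (fun p => pvRev p)) (S, I) (1 + (m:Int))).2.getD (m+1) none =
      pvAddO (pvMinO (if palabras.getD m "" ≤ pvRev (palabras.getD (m+1) "") then S.getD m none else none)
                     (if pvRev (palabras.getD m "") ≤ pvRev (palabras.getD (m+1) "") then I.getD m none else none))
             (Costos.getD (m+1) 0)) := by
  have hmP : m < palabras.length := by omega
  have e1 : (1 + (m:Int)) - 1 = ((m : Nat) : Int) := by omega
  have e2 : (1 + (m:Int)) = (((m+1 : Nat)) : Int) := by omega
  have hinv : ∀ j, j < palabras.length →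
      (palabras.map (fun p => pvRev p)).getD j "" = pvRev (palabras.getD j "") := by
    intro j hj
    rw [List.getD_eq_getElem _ _ (by simpa using hj), List.getElem_map, List.getD_eq_getElem _ _ hj]
  simp only [pvStepA]
  simp only [e1]
  simp only [e2]
  simp only [PySem.List.pyGetD_natCast,
    PySem.List.pySetD_of_nonneg _ _ (by positivity : (0:Int) ≤ ((m+1:Nat):Int)),
    Int.toNat_natCast]
  rw [hinv m hmP, hinv (m+1) hm1P]
  have hne : m + 1 ≠ m := by omega
  have hStop' : S[m+1]?.getD none = none := by simpa [List.getD_eq_getElem?_getD] using hStop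
  have hItop' : I[m+1]?.getD none = none := by simpa [List.getD_eq_getElem?_getD] using hItop
  by_cases c1 : palabras.getD m "" ≤ palabras.getD (m+1) "" <;>
    by_cases c2 : pvRev (palabras.getD m "") ≤ palabras.getD (m+1) "" <;>
    by_cases c3 : palabras.getD m "" ≤ pvRev (palabras.getD (m+1) "") <;>
    by_cases c4 : pvRev (palabras.getD m "") ≤ pvRev (palabras.getD (m+1) "") <;>
  · simp only [c1, c2, c3, c4, if_pos, if_neg, not_false_iff]
    refine ⟨by simp, by simp, ?_, ?_, ?_⟩
    · intro j hj
      have hne' : m + 1 ≠ j := by omega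
      constructor <;>
        simp [List.getD_eq_getElem?_getD, pvGetD_set_ne _ _ _ _ hne']
    · simp [List.getD_eq_getElem?_getD,
        pvGetD_set_self _ _ _ (by omega : m + 1 < S.length),
        pvGetD_set_self _ _ _ (by simp; omega : m + 1 < (S.set (m+1) (pvMinO (S[m+1]?.getD none) (S[m]?.getD none))).length),
        pvGetD_set_ne _ _ _ _ hne, hStop', pvMinO_none_left, pvMinO_none_right]
    · simp [List.getD_eq_getElem?_getD,
        pvGetD_set_self _ _ _ (by omega : m + 1 < I.length),
        pvGetD_set_self _ _ _ (by simp; omega : m + 1 < (I.set (m+1) (pvMinO (I[m+1]?.getD none) (pvAddO (S[m]?.getD none) (Costos[m+1]?.getD 0)))).length),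
        pvGetD_set_ne _ _ _ _ hne, hItop', hStop', pvMinO_none_left, pvMinO_none_right,
        pvAddO_minO, pvAddO_none]

-- A's loop invariant
theorem pvA_inv (Costos : List Int) (palabras : List String) (N : Nat)
    (hN : 1 ≤ N) (hC : N ≤ Costos.length) (hP : N ≤ palabras.length)
    (m : Nat) (hm : m ≤ N - 1) :
    (pvST Costos palabras N m).1.length = N ∧
    (pvST Costos palabras N m).2.length = N ∧
    (∀ j : Nat, j ≤ m →
      (pvST Costos palabras N m).1.getD j none = (pvSpecF Costos palabras j).1 ∧
      (pvST Costos palabras N m).2.getD j none = (pvSpecF Costos palabras j).2) ∧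
    (∀ j : Nat, m < j →
      (pvST Costos palabras N m).1.getD j none = none ∧
      (pvST Costos palabras N m).2.getD j none = none) := by
  induction m with
  | zero =>
    have hset : ∀ v : Option Int,
        PySem.List.pySetD (List.replicate N (none : Option Int)) 0 v
          = (List.replicate N (none : Option Int)).set 0 v := by
      intro v; rw [PySem.List.pySetD_of_nonneg _ _ (by norm_num)]; rfl
    have hbase : pvST Costos palabras N 0 =
        ((List.replicate N (none : Option Int)).set 0 (some 0),
         (List.replicate N (none : Option Int)).set 0 (some (PySem.List.pyGetD Costos 0 0))) := by
      rw [pvST, hset, hset]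
    refine ⟨?_, ?_, ?_, ?_⟩
    · rw [hbase]; simp
    · rw [hbase]; simp
    · intro j hj
      interval_cases j
      rw [hbase]
      constructor <;>
        simp [List.getD_eq_getElem?_getD, pvSpecF,
          pvGetD_set_self (List.replicate N (none : Option Int)) 0 _ (by simp; omega)]
    · intro j hj
      have hne : (0:Nat) ≠ j := by omega
      rw [hbase]
      constructor <;>
      · simp only [List.getD_eq_getElem?_getD, pvGetD_set_ne _ _ _ _ hne, List.getElem?_replicate]
        split <;> rfl
  | succ m ih =>
    have hm' : m ≤ N - 1 := by omega
    obtain ⟨hL1, hL2, hEq, hNone⟩ := ih hm'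
    have hm1P : m + 1 < palabras.length := by omega
    obtain ⟨kl1, kl2, kpres, ktop1, ktop2⟩ :=
      pvStepA_eq Costos palabras m (pvST Costos palabras N m).1 (pvST Costos palabras N m).2
        hm1P (by omega) (by omega)
        (hNone (m+1) (by omega)).1 (hNone (m+1) (by omega)).2
    have hstep : pvST Costos palabras N (m+1)
        = pvStepA Costos palabras (palabras.map (fun p => pvRev p))
            ((pvST Costos palabras N m).1, (pvST Costos palabras N m).2) (1 + (m:Int)) := rfl
    rw [hstep]
    refine ⟨by rw [kl1, hL1], by rw [kl2, hL2], ?_, ?_⟩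
    · intro j hj
      rcases Nat.lt_or_ge j (m+1) with hjm | hjm
      · have hj' : j ≤ m := by omega
        exact ⟨((kpres j (by omega)).1).trans (hEq j hj').1,
               ((kpres j (by omega)).2).trans (hEq j hj').2⟩
      · have hj' : j = m + 1 := by omega
        subst hj'
        have hF : pvSpecF Costos palabras (m+1)
            = pvStepB (pvSpecF Costos palabras m)
                ((palabras.getD m "", palabras.getD (m+1) ""), Costos.getD (m+1) 0) := rfl
        rw [ktop1, ktop2, (hEq m le_rfl).1, (hEq m le_rfl).2, hF]
        exact ⟨rfl, rfl⟩
    · intro j hj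
      exact ⟨((kpres j (by omega)).1).trans (hNone j (by omega)).1,
             ((kpres j (by omega)).2).trans (hNone j (by omega)).2⟩

-- ===== B-side lemmas =====

theorem pvAddOO_none_left (x : Option Int) : pvAddOO none x = none := by cases x <;> rfl
theorem pvAddOO_none_right (x : Option Int) : pvAddOO x none = none := by cases x <;> rfl
theorem pvAddOO_assoc (x y z : Option Int) : pvAddOO (pvAddOO x y) z = pvAddOO x (pvAddOO y z) := by
  cases x <;> cases y <;> cases z <;> simp [pvAddOO, Int.add_assoc]

theorem pvMinO_comm (x y : Option Int) : pvMinO x y = pvMinO y x := by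
  cases x <;> cases y <;> simp [pvMinO, min_comm]

theorem pvMinO_assoc (x y z : Option Int) : pvMinO (pvMinO x y) z = pvMinO x (pvMinO y z) := by
  cases x <;> cases y <;> cases z <;> simp [pvMinO, min_assoc]

theorem pvMinO_left_comm (x y z : Option Int) : pvMinO x (pvMinO y z) = pvMinO y (pvMinO x z) := by
  rw [← pvMinO_assoc, pvMinO_comm x y, pvMinO_assoc]

theorem pvAddOO_minO_left (x y z : Option Int) :
    pvAddOO (pvMinO x y) z = pvMinO (pvAddOO x z) (pvAddOO y z) := by
  cases x <;> cases y <;> cases z <;> simp [pvAddOO, pvMinO, min_add_add_right]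

theorem pvAddOO_minO_right (x y z : Option Int) :
    pvAddOO x (pvMinO y z) = pvMinO (pvAddOO x y) (pvAddOO x z) := by
  cases x <;> cases y <;> cases z <;> simp [pvAddOO, pvMinO, min_add_add_left]

theorem pvIf_addOO_left {p : Prop} [Decidable p] (x z : Option Int) :
    pvAddOO (if p then x else none) z = if p then pvAddOO x z else none := by
  split <;> simp [pvAddOO_none_left]

theorem pvIf_addOO_right {p : Prop} [Decidable p] (x z : Option Int) :
    pvAddOO x (if p then z else none) = if p then pvAddOO x z else none := by
  split <;> simp [pvAddOO_none_right]

theorem pvIf_minO {p : Prop} [Decidable p] (x y : Option Int) :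
    (if p then pvMinO x y else none) = pvMinO (if p then x else none) (if p then y else none) := by
  split <;> rfl

theorem pvIf_if {p q : Prop} [Decidable p] [Decidable q] (x : Option Int) :
    (if p then (if q then x else none) else none) = if p ∧ q then x else none := by
  split <;> split <;> simp_all

theorem pvEnt_combine (palabras invertidas : List String) (L R : pvMat) (k : Nat) (a b : Bool) :
    pvEnt (pvCombine palabras invertidas L R k) a b =
    pvMinO (pvMinO (pvMinO
      (if pvForm palabras invertidas k false ≤ pvForm palabras invertidas (k+1) false then pvAddOO (pvEnt L a false) (pvEnt R false b) else none)
      (if pvForm palabras invertidas k false ≤ pvForm palabras invertidas (k+1) true then pvAddOO (pvEnt L a false) (pvEnt R true b) else none))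
      (if pvForm palabras invertidas k true ≤ pvForm palabras invertidas (k+1) false then pvAddOO (pvEnt L a true) (pvEnt R false b) else none))
      (if pvForm palabras invertidas k true ≤ pvForm palabras invertidas (k+1) true then pvAddOO (pvEnt L a true) (pvEnt R true b) else none) := by
  cases a <;> cases b <;> rfl

-- abstract associativity core: 4-term gated (min,+) merges regroup
set_option maxHeartbeats 1000000 in
theorem pvAssocCore (p00 p01 p10 p11 q00 q01 q10 q11 : Prop)
    [Decidable p00] [Decidable p01] [Decidable p10] [Decidable p11]
    [Decidable q00] [Decidable q01] [Decidable q10] [Decidable q11]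
    (a0 a1 b00 b01 b10 b11 c0 c1 : Option Int) :
    pvMinO (pvMinO (pvMinO
      (if q00 then pvAddOO (pvMinO (pvMinO (pvMinO
          (if p00 then pvAddOO a0 b00 else none) (if p01 then pvAddOO a0 b10 else none))
          (if p10 then pvAddOO a1 b00 else none)) (if p11 then pvAddOO a1 b10 else none)) c0 else none)
      (if q01 then pvAddOO (pvMinO (pvMinO (pvMinO
          (if p00 then pvAddOO a0 b00 else none) (if p01 then pvAddOO a0 b10 else none))
          (if p10 then pvAddOO a1 b00 else none)) (if p11 then pvAddOO a1 b10 else none)) c1 else none))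
      (if q10 then pvAddOO (pvMinO (pvMinO (pvMinO
          (if p00 then pvAddOO a0 b01 else none) (if p01 then pvAddOO a0 b11 else none))
          (if p10 then pvAddOO a1 b01 else none)) (if p11 then pvAddOO a1 b11 else none)) c0 else none))
      (if q11 then pvAddOO (pvMinO (pvMinO (pvMinO
          (if p00 then pvAddOO a0 b01 else none) (if p01 then pvAddOO a0 b11 else none))
          (if p10 then pvAddOO a1 b01 else none)) (if p11 then pvAddOO a1 b11 else none)) c1 else none)
    = pvMinO (pvMinO (pvMinO
      (if p00 then pvAddOO a0 (pvMinO (pvMinO (pvMinO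
          (if q00 then pvAddOO b00 c0 else none) (if q01 then pvAddOO b00 c1 else none))
          (if q10 then pvAddOO b01 c0 else none)) (if q11 then pvAddOO b01 c1 else none)) else none)
      (if p01 then pvAddOO a0 (pvMinO (pvMinO (pvMinO
          (if q00 then pvAddOO b10 c0 else none) (if q01 then pvAddOO b10 c1 else none))
          (if q10 then pvAddOO b11 c0 else none)) (if q11 then pvAddOO b11 c1 else none)) else none))
      (if p10 then pvAddOO a1 (pvMinO (pvMinO (pvMinO
          (if q00 then pvAddOO b00 c0 else none) (if q01 then pvAddOO b00 c1 else none))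
          (if q10 then pvAddOO b01 c0 else none)) (if q11 then pvAddOO b01 c1 else none)) else none))
      (if p11 then pvAddOO a1 (pvMinO (pvMinO (pvMinO
          (if q00 then pvAddOO b10 c0 else none) (if q01 then pvAddOO b10 c1 else none))
          (if q10 then pvAddOO b11 c0 else none)) (if q11 then pvAddOO b11 c1 else none)) else none) := by
  simp only [pvAddOO_minO_left, pvAddOO_minO_right, pvIf_addOO_left, pvIf_addOO_right,
    pvIf_minO, pvIf_if, pvAddOO_assoc]
  simp only [pvMinO_assoc]
  simp [pvMinO_left_comm, and_comm]

-- associativity of the gated (min,+) merge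
theorem pvCombine_assoc (palabras invertidas : List String) (A B C : pvMat) (k1 k2 : Nat) :
    pvCombine palabras invertidas (pvCombine palabras invertidas A B k1) C k2
      = pvCombine palabras invertidas A (pvCombine palabras invertidas B C k2) k1 := by
  have h : ∀ a b : Bool,
      pvEnt (pvCombine palabras invertidas (pvCombine palabras invertidas A B k1) C k2) a b
        = pvEnt (pvCombine palabras invertidas A (pvCombine palabras invertidas B C k2) k1) a b := by
    intro a b
    rw [pvEnt_combine, pvEnt_combine]
    simp only [pvEnt_combine]
    exact pvAssocCore _ _ _ _ _ _ _ _ _ _ _ _ _ _ _ _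
  have h00 := h false false
  have h01 := h false true
  have h10 := h true false
  have h11 := h true true
  simp only [pvEnt] at h00 h01 h10 h11
  cases hL : pvCombine palabras invertidas (pvCombine palabras invertidas A B k1) C k2
  cases hR : pvCombine palabras invertidas A (pvCombine palabras invertidas B C k2) k1
  simp_all

-- linear left fold of single matrices: pvLinF i n = matrix of segment [i .. i+n]
def pvLinF (Costos : List Int) (palabras invertidas : List String) (i : Nat) : Nat → pvMat
  | 0 => pvSingle Costos i
  | n+1 => pvCombine palabras invertidas (pvLinF Costos palabras invertidas i n)
      (pvSingle Costos (i+n+1)) (i+n)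

-- merging two adjacent linear folds is the linear fold of the union
theorem pvLinF_merge (Costos : List Int) (palabras invertidas : List String) (i a b : Nat) :
    pvCombine palabras invertidas (pvLinF Costos palabras invertidas i a)
        (pvLinF Costos palabras invertidas (i+a+1) b) (i+a)
      = pvLinF Costos palabras invertidas i (a+b+1) := by
  induction b with
  | zero => rfl
  | succ b ih =>
    have e1 : pvLinF Costos palabras invertidas (i+a+1) (b+1)
        = pvCombine palabras invertidas (pvLinF Costos palabras invertidas (i+a+1) b)
            (pvSingle Costos (i+a+1+b+1)) (i+a+1+b) := rfl
    rw [e1, ← pvCombine_assoc, ih]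
    have e2 : i+a+1+b+1 = i+(a+b+1)+1 := by omega
    have e3 : i+a+1+b = i+(a+b+1) := by omega
    rw [e2, e3]
    rfl

-- the same, stated with subtractions as it is used
theorem pvLinF_merge' (Costos : List Int) (palabras invertidas : List String) (i m j : Nat)
    (h1 : i ≤ m) (h2 : m < j) :
    pvCombine palabras invertidas (pvLinF Costos palabras invertidas i (m - i))
        (pvLinF Costos palabras invertidas (m+1) (j - (m+1))) m
      = pvLinF Costos palabras invertidas i (j - i) := by
  have h := pvLinF_merge Costos palabras invertidas i (m - i) (j - m - 1)
  rw [show i + (m - i) = m from by omega] at h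
  rw [show (m - i) + (j - m - 1) + 1 = j - i from by omega] at h
  rw [show j - m - 1 = j - (m+1) from by omega] at h
  exact h

-- the balanced divide-and-conquer equals the linear fold
theorem pvSeg_eq_linF (Costos : List Int) (palabras invertidas : List String) :
    ∀ n i j : Nat, j - i ≤ n → i ≤ j →
      pvSeg Costos palabras invertidas i j = pvLinF Costos palabras invertidas i (j - i) := by
  intro n
  induction n with
  | zero =>
    intro i j h1 h2
    have : i = j := by omega
    subst this
    rw [pvSeg]
    simp
    rfl
  | succ n ih =>
    intro i j h1 h2
    rw [pvSeg]
    by_cases h : i < j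
    · simp only [h, dif_pos]
      rw [ih i ((i+j)/2) (by omega) (by omega), ih ((i+j)/2 + 1) j (by omega) (by omega)]
      exact pvLinF_merge' Costos palabras invertidas i ((i+j)/2) j (by omega) (by omega)
    · simp only [h, dif_neg, not_false_iff]
      have : i = j := by omega
      subst this
      simp
      rfl

theorem pvRev_empty : pvRev "" = "" := by decide

theorem pvMapRev_getD (palabras : List String) (k : Nat) :
    (palabras.map (fun p => pvRev p)).getD k "" = pvRev (palabras.getD k "") := by
  by_cases h : k < palabras.length
  · rw [List.getD_eq_getElem _ _ (by simpa using h), List.getElem_map, List.getD_eq_getElem _ _ h]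
  · rw [List.getD_eq_default _ _ (by simpa using h), List.getD_eq_default _ _ (by omega)]
    exact pvRev_empty.symm

theorem pvAddOO_some_zero (x : Option Int) : pvAddOO x (some 0) = x := by
  cases x <;> simp [pvAddOO]

theorem pvAddOO_some (x : Option Int) (c : Int) : pvAddOO x (some c) = pvAddO x c := by
  cases x <;> rfl

theorem pvIf_addO {p : Prop} [Decidable p] (x : Option Int) (c : Int) :
    pvAddO (if p then x else none) c = if p then pvAddO x c else none := by
  split <;> rfl

-- the two dp values are the column-minima of the linear-fold prefix matrix
theorem pvLinF_spec (Costos : List Int) (palabras : List String) (j : Nat) :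
    (pvSpecF Costos palabras j).1
      = pvMinO (pvLinF Costos palabras (palabras.map (fun p => pvRev p)) 0 j).m00
               (pvLinF Costos palabras (palabras.map (fun p => pvRev p)) 0 j).m10 ∧
    (pvSpecF Costos palabras j).2
      = pvMinO (pvLinF Costos palabras (palabras.map (fun p => pvRev p)) 0 j).m01
               (pvLinF Costos palabras (palabras.map (fun p => pvRev p)) 0 j).m11 := by
  induction j with
  | zero =>
    constructor
    · simp [pvSpecF, pvLinF, pvSingle, pvMinO_none_right]
    · simp [pvSpecF, pvLinF, pvSingle, pvMinO_none_left, PySem.List.pyGetD_zero]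
  | succ j ih =>
    obtain ⟨ih1, ih2⟩ := ih
    have hL : pvLinF Costos palabras (palabras.map (fun p => pvRev p)) 0 (j+1)
        = pvCombine palabras (palabras.map (fun p => pvRev p))
            (pvLinF Costos palabras (palabras.map (fun p => pvRev p)) 0 j)
            (pvSingle Costos (j+1)) j := by
      have : 0+j+1 = j+1 := by omega
      have e : 0+j = j := by omega
      rw [pvLinF, this, e]
    have hF : pvSpecF Costos palabras (j+1)
        = pvStepB (pvSpecF Costos palabras j)
            ((palabras.getD j "", palabras.getD (j+1) ""), Costos.getD (j+1) 0) := rfl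
    rw [hF, hL]
    set L := pvLinF Costos palabras (palabras.map (fun p => pvRev p)) 0 j with hLdef
    constructor
    · simp only [pvStepB, pvCombine, pvForm, pvEnt, pvSingle]
      rw [pvMapRev_getD, pvMapRev_getD]
      simp only [eq_self_iff_true, Bool.false_eq_true, if_true, if_false,
        pvAddOO_none_right, ite_self, pvAddOO_some_zero,
        pvMinO_none_right, pvMinO_none_left, ih1, ih2, pvIf_minO]
      simp only [pvMinO_assoc, pvMinO_left_comm, pvMinO_comm]
    · simp only [pvStepB, pvCombine, pvForm, pvEnt, pvSingle]
      rw [pvMapRev_getD, pvMapRev_getD]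
      simp only [eq_self_iff_true, Bool.false_eq_true, if_true, if_false,
        pvAddOO_none_right, ite_self, pvAddOO_some,
        pvMinO_none_right, pvMinO_none_left, ih1, ih2, pvAddO_minO, pvIf_addO, pvIf_minO]
      simp only [pvMinO_assoc, pvMinO_left_comm, pvMinO_comm]

-- ===== VERDICT (by name: the statement is the Claim_ definition above) =====
theorem alfabeticamente_spec : Claim_equal_alfabeticamente := by
  intro cantd Costos palabras _ hpre
  obtain ⟨h1, hC, hP⟩ := hpre
  unfold Spec_alfabeticamente
  have hN1 : 1 ≤ cantd.toNat := by omega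
  have hCN : cantd.toNat ≤ Costos.length := by omega
  have hPN : cantd.toNat ≤ palabras.length := by omega
  obtain ⟨hL1, hL2, hEq, -⟩ :=
    pvA_inv Costos palabras cantd.toNat hN1 hCN hPN (cantd.toNat - 1) le_rfl
  have hrange : PySem.List.pyRange 1 cantd 1
      = List.map (fun (k : Nat) => (1 : Int) + (k : Int)) (List.range (cantd.toNat - 1)) := by
    rw [PySem.List.pyRange_one]
    congr 2
    omega
  have hA : alfabeticamente cantd Costos palabras =
      match pvMinO (pvSpecF Costos palabras (cantd.toNat - 1)).1
                   (pvSpecF Costos palabras (cantd.toNat - 1)).2 with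
      | none => -1
      | some v => v := by
    simp only [alfabeticamente]
    rw [hrange, pvA_fold]
    have hne1 : (pvST Costos palabras cantd.toNat (cantd.toNat - 1)).1 ≠ [] := by
      intro h; rw [h] at hL1; simp at hL1; omega
    have hne2 : (pvST Costos palabras cantd.toNat (cantd.toNat - 1)).2 ≠ [] := by
      intro h; rw [h] at hL2; simp at hL2; omega
    rw [PySem.List.pyGetD_neg_one _ _ hne1, PySem.List.pyGetD_neg_one _ _ hne2]
    have g1 : (pvST Costos palabras cantd.toNat (cantd.toNat - 1)).1.getLast hne1
        = (pvST Costos palabras cantd.toNat (cantd.toNat - 1)).1.getD (cantd.toNat - 1) none := by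
      rw [List.getLast_eq_getElem, List.getD_eq_getElem _ _ (by omega)]
      congr 1
      omega
    have g2 : (pvST Costos palabras cantd.toNat (cantd.toNat - 1)).2.getLast hne2
        = (pvST Costos palabras cantd.toNat (cantd.toNat - 1)).2.getD (cantd.toNat - 1) none := by
      rw [List.getLast_eq_getElem, List.getD_eq_getElem _ _ (by omega)]
      congr 1
      omega
    rw [g1, g2, (hEq (cantd.toNat - 1) le_rfl).1, (hEq (cantd.toNat - 1) le_rfl).2]
  have hSeg : pvSeg Costos palabras (palabras.map (fun p => pvRev p)) 0 (cantd - 1).toNat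
      = pvLinF Costos palabras (palabras.map (fun p => pvRev p)) 0 (cantd.toNat - 1) := by
    have e : (cantd - 1).toNat = cantd.toNat - 1 := by omega
    rw [e]
    have := pvSeg_eq_linF Costos palabras (palabras.map (fun p => pvRev p))
      (cantd.toNat - 1) 0 (cantd.toNat - 1) (by omega) (by omega)
    simpa using this
  have hB : alfabeticamente_alt cantd Costos palabras =
      match pvMinO (pvSpecF Costos palabras (cantd.toNat - 1)).1
                   (pvSpecF Costos palabras (cantd.toNat - 1)).2 with
      | none => -1
      | some v => v := by
    simp only [alfabeticamente_alt]
    rw [hSeg]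
    obtain ⟨e1, e2⟩ := pvLinF_spec Costos palabras (cantd.toNat - 1)
    rw [e1, e2]
    set M := pvLinF Costos palabras (palabras.map (fun p => pvRev p)) 0 (cantd.toNat - 1)
    have h4 : pvMinO (pvMinO (pvMinO M.m00 M.m01) M.m10) M.m11
        = pvMinO (pvMinO M.m00 M.m10) (pvMinO M.m01 M.m11) := by
      simp only [pvMinO_assoc, pvMinO_left_comm, pvMinO_comm]
    rw [h4]
  rw [hA, hB]
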